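-- pv_equiv track=rewrite | github.com/SlyWombat/SlyLED | tools/dmx_monitor.py | colour_slot_name
-- ===== SOURCE A (Python) =====
-- COLOUR_SLOTS = {
--     "movinghead-150w-12ch": [
--         (0, 15, "white"), (16, 31, "red"), (32, 47, "yellow"),
--         (48, 63, "green"), (64, 79, "magenta"), (80, 95, "blue"),
--         (96, 111, "amber"), (112, 127, "lightblue"),
--     ],
-- }
--
-- def colour_slot_name(profile, dmx):
--     if dmx is None:
--         return None
--     slots = COLOUR_SLOTS.get(profile, [])
--     for lo, hi, name in slots:
--         if lo <= dmx <= hi: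
--             return name
--     return f"raw:{dmx}"
-- ===== SOURCE B (Python) =====
-- SLOT_NAMES = {
--     "movinghead-150w-12ch": [
--         "white", "red", "yellow", "green",
--         "magenta", "blue", "amber", "lightblue",
--     ],
-- }
--
-- def colour_slot_name(profile, dmx):
--     if dmx is None:
--         return None
--     names = SLOT_NAMES.get(profile, [])
--     if 0 <= dmx < 16 * len(names):
--         return names[dmx // 16]
--     return f"raw:{dmx}"
-- ===== Notes on version B (the rewrite author's own statement) =====
-- stated objective: simpler
-- what changed: Replaces the linear scan over (lo,hi,name) ranges with arithmetic indexing: since each slot is a uniform 16-wide band, B keeps only the ordered name list per profile and returns names[dmx // 16] when 0 <= dmx < 16*len(names).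
import Mathlib
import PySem

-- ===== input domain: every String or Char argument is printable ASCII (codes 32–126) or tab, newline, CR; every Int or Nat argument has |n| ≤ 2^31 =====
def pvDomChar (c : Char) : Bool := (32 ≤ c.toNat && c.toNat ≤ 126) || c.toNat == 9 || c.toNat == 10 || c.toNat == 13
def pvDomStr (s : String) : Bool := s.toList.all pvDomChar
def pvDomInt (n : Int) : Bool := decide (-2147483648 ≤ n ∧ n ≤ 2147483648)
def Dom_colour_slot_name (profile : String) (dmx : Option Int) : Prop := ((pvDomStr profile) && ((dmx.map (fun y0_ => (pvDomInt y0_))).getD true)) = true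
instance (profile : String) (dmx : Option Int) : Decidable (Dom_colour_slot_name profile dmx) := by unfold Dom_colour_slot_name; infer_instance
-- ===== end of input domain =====

-- B replaces A's linear scan over (lo,hi,name) ranges by O(1) arithmetic indexing into the ordered name list (objective: simpler).

-- ===== PORT A =====
def COLOUR_SLOTS : PySem.Dict String (List (Int × Int × String)) :=
  PySem.Dict.ofList [("movinghead-150w-12ch",
    [(0, 15, "white"), (16, 31, "red"), (32, 47, "yellow"),
     (48, 63, "green"), (64, 79, "magenta"), (80, 95, "blue"),
     (96, 111, "amber"), (112, 127, "lightblue")])]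

-- the 'for lo, hi, name in slots: if lo <= dmx <= hi: return name' loop
def scanSlots (dmx : Int) : List (Int × Int × String) → Option String
  | [] => none
  | (lo, hi, name) :: rest =>
      if lo ≤ dmx ∧ dmx ≤ hi then some name else scanSlots dmx rest

def colour_slot_name (profile : String) (dmx : Option Int) : Option String :=
  match dmx with
  | none => none
  | some d =>
      let slots := (COLOUR_SLOTS.get? profile).getD []
      match scanSlots d slots with
      | some name => some name
      | none => some ("raw:" ++ PySem.Int.toStr d)

-- ===== PORT B =====
def SLOT_NAMES : PySem.Dict String (List String) :=
  PySem.Dict.ofList [("movinghead-150w-12ch",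
    ["white", "red", "yellow", "green", "magenta", "blue", "amber", "lightblue"])]

def colour_slot_name_alt (profile : String) (dmx : Option Int) : Option String :=
  match dmx with
  | none => none
  | some d =>
      let names := (SLOT_NAMES.get? profile).getD []
      if 0 ≤ d ∧ d < 16 * (names.length : Int) then
        PySem.List.pyGet? names (PySem.Int.floordiv d 16)  -- names[dmx // 16]; in range under the guard
      else some ("raw:" ++ PySem.Int.toStr d)

-- ===== PRECONDITION & SPEC =====
def Spec_colour_slot_name (profile : String) (dmx : Option Int) (out : Option String) : Prop := out = colour_slot_name_alt profile dmx
instance (profile : String) (dmx : Option Int) (out : Option String) : Decidable (Spec_colour_slot_name profile dmx out) := by unfold Spec_colour_slot_name; infer_instance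

-- ===== CLAIM (what is proved, stated in full; the proofs are below) =====
def Claim_equal_colour_slot_name : Prop := ∀ (profile : String) (dmx : Option Int), Dom_colour_slot_name profile dmx → Spec_colour_slot_name profile dmx (colour_slot_name profile dmx)

-- ===== LEMMAS AND PROOFS =====

-- for the known profile, the two computations agree for every dmx
theorem known_profile_eq (d : Int) :
    colour_slot_name "movinghead-150w-12ch" (some d)
      = colour_slot_name_alt "movinghead-150w-12ch" (some d) := by
  by_cases h : 0 ≤ d ∧ d < 128
  · obtain ⟨h0, h1⟩ := h
    interval_cases d <;> decide
  · simp only [colour_slot_name, colour_slot_name_alt]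
    have hd : COLOUR_SLOTS.get? "movinghead-150w-12ch"
        = some [((0:Int), (15:Int), "white"), (16, 31, "red"), (32, 47, "yellow"),
                (48, 63, "green"), (64, 79, "magenta"), (80, 95, "blue"),
                (96, 111, "amber"), (112, 127, "lightblue")] := by decide
    have hn : SLOT_NAMES.get? "movinghead-150w-12ch"
        = some ["white", "red", "yellow", "green", "magenta", "blue", "amber", "lightblue"] := by
      decide
    rw [hd, hn]
    simp only [Option.getD_some, scanSlots, List.length]
    split_ifs <;> first | rfl | omega

-- for any other profile, both sides fall through to the raw string
theorem other_profile_eq (profile : String) (hne : profile ≠ "movinghead-150w-12ch") (d : Int) :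
    colour_slot_name profile (some d) = colour_slot_name_alt profile (some d) := by
  have hkd : COLOUR_SLOTS.keys = ["movinghead-150w-12ch"] := by decide
  have hkn : SLOT_NAMES.keys = ["movinghead-150w-12ch"] := by decide
  have hd : COLOUR_SLOTS.get? profile = none := by
    rw [PySem.Dict.get?_eq_none_iff_not_mem_keys, hkd]; simp [hne]
  have hn : SLOT_NAMES.get? profile = none := by
    rw [PySem.Dict.get?_eq_none_iff_not_mem_keys, hkn]; simp [hne]
  simp only [colour_slot_name, colour_slot_name_alt, hd, hn, Option.getD_none, scanSlots,
    List.length_nil]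
  split_ifs with h
  · omega
  · rfl

-- ===== VERDICT (by name: the statement is the Claim_ definition above) =====
theorem colour_slot_name_spec : Claim_equal_colour_slot_name := by
  intro profile dmx _
  unfold Spec_colour_slot_name
  match dmx with
  | none => rfl
  | some d =>
    by_cases hp : profile = "movinghead-150w-12ch"
    · subst hp; exact known_profile_eq d
    · exact other_profile_eq profile hp d
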